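-- pv_equiv track=rewrite | github.com/wilsww/taiwan-stock-analysis | scripts/dashboard/helpers.py | build_missing_spans
-- ===== SOURCE A (Python) =====
-- from typing import Optional
--
-- def build_missing_spans(
--     labels: list[str],
--     missing_set: set[str],
-- ) -> list[tuple[int, int, bool, bool]]:
--     """回傳連續缺漏區間與左右是否緊鄰有效資料。"""
--     spans: list[tuple[int, int, bool, bool]] = []
--     span_start: Optional[int] = None
--     span_end: Optional[int] = None
--
--     for idx, lbl in enumerate(labels):
--         if lbl not in missing_set:
--             if span_start is not None and span_end is not None:
--                 has_left_data = span_start > 0 and labels[span_start - 1] not in missing_set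
--                 has_right_data = span_end + 1 < len(labels) and labels[span_end + 1] not in missing_set
--                 spans.append((span_start, span_end, has_left_data, has_right_data))
--                 span_start = span_end = None
--             continue
--
--         if span_start is None:
--             span_start = span_end = idx
--         else:
--             span_end = idx
--
--     if span_start is not None and span_end is not None:
--         has_left_data = span_start > 0 and labels[span_start - 1] not in missing_set
--         has_right_data = span_end + 1 < len(labels) and labels[span_end + 1] not in missing_set
--         spans.append((span_start, span_end, has_left_data, has_right_data))
--
--     return spans
-- ===== SOURCE B (Python) =====
-- def build_missing_spans(
--     labels: list[str],
--     missing_set: set[str],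
-- ) -> list[tuple[int, int, bool, bool]]:
--     """Run-scanning rewrite: find each maximal missing run directly, no carried span state."""
--     spans: list[tuple[int, int, bool, bool]] = []
--     n = len(labels)
--     i = 0
--     while i < n:
--         if labels[i] not in missing_set:
--             i += 1
--             continue
--         j = i
--         while j + 1 < n and labels[j + 1] in missing_set:
--             j += 1
--         has_left_data = i > 0 and labels[i - 1] not in missing_set
--         has_right_data = j + 1 < n and labels[j + 1] not in missing_set
--         spans.append((i, j, has_left_data, has_right_data))
--         i = j + 1
--     return spans
-- ===== Notes on version B (the rewrite author's own statement) =====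
-- stated objective: simpler
-- what changed: Replaces A's enumerate-driven state machine carrying Optional span_start/span_end with duplicated flush code by a direct index scan that consumes each maximal missing run with an inner while loop and emits its span tuple immediately.
import Mathlib
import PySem

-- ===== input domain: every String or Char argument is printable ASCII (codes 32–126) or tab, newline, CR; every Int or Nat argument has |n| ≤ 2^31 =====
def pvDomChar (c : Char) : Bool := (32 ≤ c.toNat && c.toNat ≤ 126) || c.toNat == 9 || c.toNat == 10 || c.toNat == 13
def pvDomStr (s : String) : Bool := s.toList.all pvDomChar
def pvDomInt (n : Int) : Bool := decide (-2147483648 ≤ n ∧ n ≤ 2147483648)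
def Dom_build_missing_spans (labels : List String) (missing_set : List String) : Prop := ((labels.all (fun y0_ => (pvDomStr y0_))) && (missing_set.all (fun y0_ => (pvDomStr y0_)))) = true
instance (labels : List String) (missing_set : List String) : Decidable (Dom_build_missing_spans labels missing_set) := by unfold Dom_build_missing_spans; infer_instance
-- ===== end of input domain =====

-- B replaces A's carried span_start/span_end state machine (with its duplicated flush code) by a
-- direct scan that consumes each maximal missing run in an inner loop; objective: simpler.
-- A is total, so there is no Pre_.

-- ===== PORT A =====
-- A's flag expressions (list indexing is guarded in range by the short-circuit `and`, so getD is exact).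
def bmsAHL (labels missing_set : List String) (s : Nat) : Bool :=
  decide (0 < s) && !(missing_set.contains (labels.getD (s - 1) ""))

def bmsAHR (labels missing_set : List String) (e : Nat) : Bool :=
  decide (e + 1 < labels.length) && !(missing_set.contains (labels.getD (e + 1) ""))

-- the `for idx, lbl in enumerate(labels)` loop, carrying (spans, span_start, span_end)
def bmsALoop (labels missing_set : List String) (rest : List String) (idx : Nat)
    (st : List (Int × Int × Bool × Bool) × Option Nat × Option Nat) :
    List (Int × Int × Bool × Bool) × Option Nat × Option Nat :=
  match rest with
  | [] => st
  | lbl :: rest' =>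
    let st' :=
      if !(missing_set.contains lbl) then
        match st with
        | (spans, some s, some e) =>
            (spans ++ [((s : Int), (e : Int), bmsAHL labels missing_set s, bmsAHR labels missing_set e)],
             none, none)
        | _ => st
      else
        match st with
        | (spans, none, _) => (spans, some idx, some idx)
        | (spans, some s, _) => (spans, some s, some idx)
    bmsALoop labels missing_set rest' (idx + 1) st'

-- the trailing flush after the loop
def bmsAFlush (labels missing_set : List String)
    (st : List (Int × Int × Bool × Bool) × Option Nat × Option Nat) :
    List (Int × Int × Bool × Bool) :=
  match st with
  | (spans, some s, some e) =>
      spans ++ [((s : Int), (e : Int), bmsAHL labels missing_set s, bmsAHR labels missing_set e)]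
  | (spans, _, _) => spans

def build_missing_spans (labels : List String) (missing_set : List String) :
    List (Int × Int × Bool × Bool) :=
  bmsAFlush labels missing_set (bmsALoop labels missing_set labels 0 ([], none, none))

-- ===== PORT B =====
def bmsBHL (labels missing_set : List String) (i : Nat) : Bool :=
  decide (0 < i) && !(missing_set.contains (labels.getD (i - 1) ""))

def bmsBHR (labels missing_set : List String) (j : Nat) : Bool :=
  decide (j + 1 < labels.length) && !(missing_set.contains (labels.getD (j + 1) ""))

-- inner `while j + 1 < n and labels[j + 1] in missing_set: j += 1`
def bmsRunEnd (labels missing_set : List String) (j : Nat) : Nat :=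
  if h : j + 1 < labels.length ∧ missing_set.contains (labels.getD (j + 1) "") = true then
    bmsRunEnd labels missing_set (j + 1)
  else j
termination_by labels.length - j
decreasing_by obtain ⟨h1, -⟩ := h; omega

theorem bmsRunEnd_ge (labels missing_set : List String) (j : Nat) :
    j ≤ bmsRunEnd labels missing_set j := by
  unfold bmsRunEnd
  split
  · exact le_trans (Nat.le_succ j) (bmsRunEnd_ge labels missing_set (j + 1))
  · exact le_refl j
termination_by labels.length - j
decreasing_by omega

-- outer `while i < n` loop
def bmsGo (labels missing_set : List String) (i : Nat) : List (Int × Int × Bool × Bool) :=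
  if hi : i < labels.length then
    if missing_set.contains (labels.getD i "") then
      let j := bmsRunEnd labels missing_set i
      ((i : Int), (j : Int), bmsBHL labels missing_set i, bmsBHR labels missing_set j) ::
        bmsGo labels missing_set (j + 1)
    else bmsGo labels missing_set (i + 1)
  else []
termination_by labels.length - i
decreasing_by
  · have := bmsRunEnd_ge labels missing_set i; omega
  · omega

def build_missing_spans_alt (labels : List String) (missing_set : List String) :
    List (Int × Int × Bool × Bool) :=
  bmsGo labels missing_set 0

-- ===== PRECONDITION & SPEC =====
def Spec_build_missing_spans (labels : List String) (missing_set : List String) (out : List (Int × Int × Bool × Bool)) : Prop := out = build_missing_spans_alt labels missing_set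
instance (labels : List String) (missing_set : List String) (out : List (Int × Int × Bool × Bool)) : Decidable (Spec_build_missing_spans labels missing_set out) := by unfold Spec_build_missing_spans; infer_instance

-- ===== CLAIM (what is proved, stated in full; the proofs are below) =====
def Claim_equal_build_missing_spans : Prop := ∀ (labels : List String) (missing_set : List String), Dom_build_missing_spans labels missing_set → Spec_build_missing_spans labels missing_set (build_missing_spans labels missing_set)

-- ===== LEMMAS AND PROOFS =====

theorem bmsGo_stop (labels missing_set : List String) (i : Nat) (h : ¬ i < labels.length) :
    bmsGo labels missing_set i = [] := by
  rw [bmsGo, dif_neg h]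

theorem bmsGo_skip (labels missing_set : List String) (i : Nat) (h : i < labels.length)
    (hc : missing_set.contains (labels.getD i "") = false) :
    bmsGo labels missing_set i = bmsGo labels missing_set (i + 1) := by
  rw [bmsGo, dif_pos h, if_neg (by rw [hc]; exact Bool.false_ne_true)]

theorem bmsGo_run (labels missing_set : List String) (i : Nat) (h : i < labels.length)
    (hc : missing_set.contains (labels.getD i "") = true) :
    bmsGo labels missing_set i =
      ((i : Int), ((bmsRunEnd labels missing_set i : Nat) : Int),
        bmsBHL labels missing_set i, bmsBHR labels missing_set (bmsRunEnd labels missing_set i)) ::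
        bmsGo labels missing_set (bmsRunEnd labels missing_set i + 1) := by
  rw [bmsGo, dif_pos h, if_pos hc]

theorem bmsMain (labels missing_set : List String) (rest : List String) (idx : Nat)
    (hrest : rest = labels.drop idx) :
    (∀ spans,
        bmsAFlush labels missing_set (bmsALoop labels missing_set rest idx (spans, none, none)) =
          spans ++ bmsGo labels missing_set idx)
    ∧ (∀ spans s, 1 ≤ idx →
        bmsAFlush labels missing_set
            (bmsALoop labels missing_set rest idx (spans, some s, some (idx - 1))) =
          spans ++
            (((s : Int), ((bmsRunEnd labels missing_set (idx - 1) : Nat) : Int),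
              bmsAHL labels missing_set s,
              bmsAHR labels missing_set (bmsRunEnd labels missing_set (idx - 1))) ::
              bmsGo labels missing_set (bmsRunEnd labels missing_set (idx - 1) + 1))) := by
  induction rest generalizing idx with
  | nil =>
    have hlen : labels.length ≤ idx := List.drop_eq_nil_iff.mp hrest.symm
    constructor
    · intro spans
      rw [bmsGo_stop labels missing_set idx (by omega)]
      simp [bmsALoop, bmsAFlush]
    · intro spans s _h1
      have e1 : idx - 1 + 1 = idx := by omega
      have hre : bmsRunEnd labels missing_set (idx - 1) = idx - 1 := by
        rw [bmsRunEnd, e1, dif_neg]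
        rintro ⟨hcon, -⟩; omega
      rw [hre, e1, bmsGo_stop labels missing_set idx (by omega)]
      simp [bmsALoop, bmsAFlush]
  | cons lbl rest' IH =>
    have hlt : idx < labels.length := by
      by_contra hcon
      rw [Nat.not_lt] at hcon
      rw [List.drop_eq_nil_iff.mpr hcon] at hrest
      simp at hrest
    have hget : labels.getD idx "" = lbl := by
      have h0 : (List.drop idx labels)[(0 : Nat)]? = labels[idx + 0]? := List.getElem?_drop
      rw [← hrest] at h0
      simp at h0
      simp [List.getD_eq_getElem?_getD, ← h0]
    have hrest' : rest' = labels.drop (idx + 1) := by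
      have h : (List.drop idx labels).tail = List.drop (idx + 1) labels := List.tail_drop
      rw [← hrest] at h
      simpa using h
    obtain ⟨IHa, IHb⟩ := IH (idx + 1) hrest'
    have e2 : idx + 1 - 1 = idx := by omega
    constructor
    · intro spans
      by_cases hcm : lbl ∈ missing_set
      · have hc : missing_set.contains (labels.getD idx "") = true := by
          rw [hget]; simpa using hcm
        have lhs : bmsALoop labels missing_set (lbl :: rest') idx (spans, none, none) =
            bmsALoop labels missing_set rest' (idx + 1) (spans, some idx, some idx) := by
          simp [bmsALoop, hcm]
        rw [bmsGo_run labels missing_set idx hlt hc, lhs]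
        have := IHb spans idx (by omega)
        rw [e2] at this
        rw [this]
        rfl
      · have hc : missing_set.contains (labels.getD idx "") = false := by
          rw [hget]; simpa using hcm
        have lhs : bmsALoop labels missing_set (lbl :: rest') idx (spans, none, none) =
            bmsALoop labels missing_set rest' (idx + 1) (spans, none, none) := by
          simp [bmsALoop, hcm]
        rw [bmsGo_skip labels missing_set idx hlt hc, lhs, IHa spans]
    · intro spans s h1
      have e1 : idx - 1 + 1 = idx := by omega
      by_cases hcm : lbl ∈ missing_set
      · have hc : missing_set.contains (labels.getD idx "") = true := by
          rw [hget]; simpa using hcm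
        have lhs : bmsALoop labels missing_set (lbl :: rest') idx (spans, some s, some (idx - 1)) =
            bmsALoop labels missing_set rest' (idx + 1) (spans, some s, some idx) := by
          simp [bmsALoop, hcm]
        have hre : bmsRunEnd labels missing_set (idx - 1) = bmsRunEnd labels missing_set idx := by
          conv_lhs => rw [bmsRunEnd]
          rw [e1, dif_pos ⟨hlt, hc⟩]
        rw [lhs]
        have := IHb spans s (by omega)
        rw [e2] at this
        rw [this, hre]
      · have hc : missing_set.contains (labels.getD idx "") = false := by
          rw [hget]; simpa using hcm
        have hre : bmsRunEnd labels missing_set (idx - 1) = idx - 1 := by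
          rw [bmsRunEnd, e1, dif_neg]
          rintro ⟨-, hcon⟩
          rw [hc] at hcon
          exact Bool.false_ne_true hcon
        have lhs : bmsALoop labels missing_set (lbl :: rest') idx (spans, some s, some (idx - 1)) =
            bmsALoop labels missing_set rest' (idx + 1)
              (spans ++ [((s : Int), ((idx - 1 : Nat) : Int), bmsAHL labels missing_set s,
                bmsAHR labels missing_set (idx - 1))], none, none) := by
          simp [bmsALoop, hcm]
        rw [hre, e1, bmsGo_skip labels missing_set idx hlt hc, lhs, IHa]
        simp

-- ===== VERDICT (by name: the statement is the Claim_ definition above) =====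
theorem build_missing_spans_spec : Claim_equal_build_missing_spans := by
  intro labels missing_set _
  unfold Spec_build_missing_spans build_missing_spans build_missing_spans_alt
  have := (bmsMain labels missing_set labels 0 (by simp)).1 []
  simpa using this
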